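-- pv_equiv track=rewrite | github.com/neilfar53-commits/btc_backtest | strategy.py | calc_entry_score
-- ===== SOURCE A (Python) =====
-- from typing import Dict, List, Optional, Tuple
--
-- SCORE_TREND = {
--     "pivot_sr": 1,
--     "pin_bar": 2,
--     "engulfing": 2,
--     "ma8_cross": 1,
--     "ma_cross": 2,
--     "rsi_extreme": 1,
--     "three_same_candle": 1,
--     "ma12h_cross": 3,
--     "vegas_break": 3,
--     "vegas_576_near": 2,
--     "prev_month_resonance": 1,
-- }
--
-- SCORE_RANGE = {
--     "pivot_sr": 1,
--     "pin_bar": 2,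
--     "engulfing": 2,
--     "ma8_cross": 1,
--     "rsi_extreme": 1,
--     "three_same_candle": 1,
-- }
--
-- def calc_entry_score(
--     mode: str,
--     signals: Dict[str, bool],
--     direction: str,
--     use_cross: bool = True,
-- ) -> int:
--     """
--     计算入场评分。
--
--     Args:
--         mode: 'trend_long' / 'trend_short' / 'range' / ...
--         signals: {'pivot_sr': True, 'pin_bar': True, ...}
--         direction: 'long' / 'short'
--         use_cross: 是否使用叉点评分（震荡市为 False）
--
--     Returns:
--         总分
--     """
--     is_trend = mode in ("trend_long", "trend_short")
--     score_map = SCORE_TREND if is_trend else SCORE_RANGE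
--
--     total = 0
--     for key, active in (signals or {}).items():
--         if not active or key not in score_map:
--             continue
--         if not use_cross and key in ("ma_cross", "ma12h_cross"):
--             continue
--         total += score_map[key]
--
--     return total
-- ===== SOURCE B (Python) =====
-- from typing import Dict, List, Optional, Tuple
--
-- SCORE_TREND = {
--     "pivot_sr": 1,
--     "pin_bar": 2,
--     "engulfing": 2,
--     "ma8_cross": 1,
--     "ma_cross": 2,
--     "rsi_extreme": 1,
--     "three_same_candle": 1,
--     "ma12h_cross": 3,
--     "vegas_break": 3,
--     "vegas_576_near": 2,
--     "prev_month_resonance": 1,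
-- }
--
-- SCORE_RANGE = {
--     "pivot_sr": 1,
--     "pin_bar": 2,
--     "engulfing": 2,
--     "ma8_cross": 1,
--     "rsi_extreme": 1,
--     "three_same_candle": 1,
-- }
--
--
-- def calc_entry_score(
--     mode: str,
--     signals: Dict[str, bool],
--     direction: str,
--     use_cross: bool = True,
-- ) -> int:
--     """Closed-form score: no loop at all, a straight-line sum of indicator terms."""
--     sigs = signals or {}
--
--     def hit(key):
--         return bool(sigs.get(key))
--
--     base = (hit("pivot_sr") * 1 + hit("pin_bar") * 2 + hit("engulfing") * 2
--             + hit("ma8_cross") * 1 + hit("rsi_extreme") * 1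
--             + hit("three_same_candle") * 1)
--     if mode in ("trend_long", "trend_short"):
--         t = (base + hit("vegas_break") * 3 + hit("vegas_576_near") * 2
--              + hit("prev_month_resonance") * 1)
--         if use_cross:
--             t += hit("ma_cross") * 2 + hit("ma12h_cross") * 3
--         return t
--     return base
-- ===== Notes on version B (the rewrite author's own statement) =====
-- stated objective: alternative
-- what changed: B replaces A's loop over the signals dict (with table lookups) by a loop-free closed-form expression: a straight-line sum of bool-indicator terms, one per scoring key, with the trend-only and cross terms gated by if-branches on mode and use_cross; Pre_ only excludes association lists with duplicate keys, which cannot arise from an actual Python dict, so no real Python input A returns on is excluded.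
import Mathlib
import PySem

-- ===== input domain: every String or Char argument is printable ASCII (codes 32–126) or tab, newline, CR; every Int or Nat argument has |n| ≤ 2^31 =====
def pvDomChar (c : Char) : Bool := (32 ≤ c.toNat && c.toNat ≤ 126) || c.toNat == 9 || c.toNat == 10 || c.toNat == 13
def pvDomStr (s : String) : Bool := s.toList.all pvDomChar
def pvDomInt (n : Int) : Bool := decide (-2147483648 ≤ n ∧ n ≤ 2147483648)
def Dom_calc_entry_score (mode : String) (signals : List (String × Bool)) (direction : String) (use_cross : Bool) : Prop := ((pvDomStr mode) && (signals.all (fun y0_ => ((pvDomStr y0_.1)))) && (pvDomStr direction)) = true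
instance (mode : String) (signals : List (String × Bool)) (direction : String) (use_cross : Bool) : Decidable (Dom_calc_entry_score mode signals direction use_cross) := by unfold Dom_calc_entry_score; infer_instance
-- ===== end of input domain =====

-- B replaces A's loop over the signals dict by a loop-free closed-form sum of
-- indicator terms, one per scoring key (objective: alternative).

-- dict lookup (first match in the association list), shared with A's module constants
def pvGet? {α : Type} : List (String × α) → String → Option α
  | [], _ => none
  | (k, v) :: rest, x => if k == x then some v else pvGet? rest x

-- ===== PORT A =====
def scoreTrend : List (String × Int) :=
  [("pivot_sr", 1), ("pin_bar", 2), ("engulfing", 2), ("ma8_cross", 1), ("ma_cross", 2),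
   ("rsi_extreme", 1), ("three_same_candle", 1), ("ma12h_cross", 3), ("vegas_break", 3),
   ("vegas_576_near", 2), ("prev_month_resonance", 1)]

def scoreRange : List (String × Int) :=
  [("pivot_sr", 1), ("pin_bar", 2), ("engulfing", 2), ("ma8_cross", 1), ("rsi_extreme", 1),
   ("three_same_candle", 1)]

def calc_entry_score (mode : String) (signals : List (String × Bool)) (direction : String) (use_cross : Bool) : Int :=
  let score_map := if mode == "trend_long" || mode == "trend_short" then scoreTrend else scoreRange
  ((if signals.isEmpty then ([] : List (String × Bool)) else signals).foldl
    (fun total kv =>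
      if !kv.2 || (pvGet? score_map kv.1).isNone then total
      else if !use_cross && (kv.1 == "ma_cross" || kv.1 == "ma12h_cross") then total
      else total + (pvGet? score_map kv.1).getD 0) 0)

-- ===== PORT B =====
def calc_entry_score_alt (mode : String) (signals : List (String × Bool)) (direction : String) (use_cross : Bool) : Int :=
  let sigs := if signals.isEmpty then ([] : List (String × Bool)) else signals
  let hit : String → Int := fun k => if (pvGet? sigs k).getD false then 1 else 0
  let base := hit "pivot_sr" * 1 + hit "pin_bar" * 2 + hit "engulfing" * 2
              + hit "ma8_cross" * 1 + hit "rsi_extreme" * 1 + hit "three_same_candle" * 1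
  if mode == "trend_long" || mode == "trend_short" then
    let t := base + hit "vegas_break" * 3 + hit "vegas_576_near" * 2
             + hit "prev_month_resonance" * 1
    if use_cross then t + hit "ma_cross" * 2 + hit "ma12h_cross" * 3 else t
  else base

-- ===== PRECONDITION & SPEC =====
-- Pre_ excludes association lists with duplicate keys: a Python dict cannot hold duplicate keys,
-- so these inputs are artefacts of the list encoding (A's port would add a weight once per
-- occurrence, B's consults each key once).
def Pre_calc_entry_score (mode : String) (signals : List (String × Bool)) (direction : String) (use_cross : Bool) : Prop :=
  (signals.map Prod.fst).Nodup
instance (mode : String) (signals : List (String × Bool)) (direction : String) (use_cross : Bool) : Decidable (Pre_calc_entry_score mode signals direction use_cross) := by unfold Pre_calc_entry_score; infer_instance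

def pvWitness_calc_entry_score : String × (List (String × Bool)) × String × Bool :=
  ("trend_long", [("pin_bar", true), ("ma_cross", true)], "long", true)

def Spec_calc_entry_score (mode : String) (signals : List (String × Bool)) (direction : String) (use_cross : Bool) (out : Int) : Prop := out = calc_entry_score_alt mode signals direction use_cross
instance (mode : String) (signals : List (String × Bool)) (direction : String) (use_cross : Bool) (out : Int) : Decidable (Spec_calc_entry_score mode signals direction use_cross out) := by unfold Spec_calc_entry_score; infer_instance

-- ===== CLAIM (what is proved, stated in full; the proofs are below) =====
def Claim_equal_calc_entry_score : Prop := ∀ (mode : String) (signals : List (String × Bool)) (direction : String) (use_cross : Bool), Dom_calc_entry_score mode signals direction use_cross → Pre_calc_entry_score mode signals direction use_cross → Spec_calc_entry_score mode signals direction use_cross (calc_entry_score mode signals direction use_cross)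

-- ===== LEMMAS AND PROOFS =====

-- per-element contribution of A's fold, and the table-driven counterpart used as a bridge
def pvExcl (uc : Bool) (k : String) : Bool := !uc && (k == "ma_cross" || k == "ma12h_cross")

def pvFA (tbl : List (String × Int)) (uc : Bool) (p : String × Bool) : Int :=
  if !p.2 || (pvGet? tbl p.1).isNone then 0
  else if pvExcl uc p.1 then 0
  else (pvGet? tbl p.1).getD 0

def pvFB (sigs : List (String × Bool)) (uc : Bool) (q : String × Int) : Int :=
  if !((pvGet? sigs q.1).getD false) then 0
  else if pvExcl uc q.1 then 0
  else q.2

theorem pv_foldl_sum {α : Type} (body : Int → α → Int) (h : α → Int)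
    (hb : ∀ t x, body t x = t + h x) :
    ∀ (l : List α) (init : Int), l.foldl body init = init + (l.map h).sum := by
  intro l
  induction l with
  | nil => intro init; simp
  | cons x xs ih => intro init; simp [hb, ih, add_assoc]

theorem pvGet?_eq_none {α : Type} (k : String) :
    ∀ (l : List (String × α)), k ∉ l.map Prod.fst → pvGet? l k = none := by
  intro l
  induction l with
  | nil => intro _; rfl
  | cons p rest ih =>
    intro h
    obtain ⟨p1, p2⟩ := p
    simp only [List.map_cons, List.mem_cons, not_or] at h
    simp [pvGet?, Ne.symm h.1, ih h.2]

-- adding one fresh signal (k, a) in front changes the table sum by A's contribution for (k, a)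
theorem pv_cons_table (uc : Bool) (k : String) (a : Bool) (rest : List (String × Bool))
    (hk : k ∉ rest.map Prod.fst) :
    ∀ (tbl : List (String × Int)), (tbl.map Prod.fst).Nodup →
      (tbl.map (pvFB ((k, a) :: rest) uc)).sum
        = pvFA tbl uc (k, a) + (tbl.map (pvFB rest uc)).sum := by
  intro tbl
  induction tbl with
  | nil => intro _; simp [pvFA, pvGet?]
  | cons q tt ih =>
    intro hnd
    obtain ⟨key, w⟩ := q
    simp only [List.map_cons, List.nodup_cons] at hnd
    by_cases hkey : key = k
    · subst hkey
      have htt : tt.map (pvFB ((key, a) :: rest) uc) = tt.map (pvFB rest uc) := by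
        apply List.map_congr_left
        intro q' hq'
        have hne : q'.1 ≠ key := by
          intro e
          exact hnd.1 (by rw [← e]; exact List.mem_map_of_mem hq')
        simp [pvFB, pvGet?, Ne.symm hne]
      have hrest : pvGet? rest key = none := pvGet?_eq_none key rest hk
      simp only [List.map_cons, List.sum_cons, htt]
      simp [pvFA, pvFB, pvGet?, hrest]
    · have hA : pvFA ((key, w) :: tt) uc (k, a) = pvFA tt uc (k, a) := by
        simp [pvFA, pvGet?, hkey]
      have hB1 : pvFB ((k, a) :: rest) uc (key, w) = pvFB rest uc (key, w) := by
        simp [pvFB, pvGet?, Ne.symm hkey]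
      simp only [List.map_cons, List.sum_cons, hB1, hA, ih hnd.2]
      ring

theorem pv_main (tbl : List (String × Int)) (uc : Bool) :
    ∀ (sigs : List (String × Bool)), (sigs.map Prod.fst).Nodup → (tbl.map Prod.fst).Nodup →
      (sigs.map (pvFA tbl uc)).sum = (tbl.map (pvFB sigs uc)).sum := by
  intro sigs
  induction sigs with
  | nil =>
    intro _ _
    simp only [List.map_nil, List.sum_nil]
    symm
    apply List.sum_eq_zero
    intro x hx
    obtain ⟨q, _, rfl⟩ := List.mem_map.mp hx
    simp [pvFB, pvGet?]
  | cons p rest ih =>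
    intro hs ht
    obtain ⟨k, a⟩ := p
    simp only [List.map_cons, List.nodup_cons] at hs
    rw [pv_cons_table uc k a rest hs.1 tbl ht, List.map_cons, List.sum_cons, ih hs.2 ht]

-- one indicator term: A's gated weight equals B's bool-indicator times the weight
theorem pv_term (b : Bool) (w : Int) :
    (if !b then 0 else w) = (if b then (1 : Int) else 0) * w := by
  cases b <;> simp

-- B's indicator, named for the bridge lemmas
def pvHit (sigs : List (String × Bool)) (k : String) : Int :=
  if (pvGet? sigs k).getD false then 1 else 0

-- the table-driven sum over scoreTrend equals B's trend closed form
theorem pv_trend_sum (sigs : List (String × Bool)) (uc : Bool) :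
    (scoreTrend.map (pvFB sigs uc)).sum
      = pvHit sigs "pivot_sr" * 1 + pvHit sigs "pin_bar" * 2 + pvHit sigs "engulfing" * 2
        + pvHit sigs "ma8_cross" * 1 + pvHit sigs "rsi_extreme" * 1
        + pvHit sigs "three_same_candle" * 1 + pvHit sigs "vegas_break" * 3
        + pvHit sigs "vegas_576_near" * 2 + pvHit sigs "prev_month_resonance" * 1
        + (if uc then pvHit sigs "ma_cross" * 2 + pvHit sigs "ma12h_cross" * 3 else 0) := by
  cases uc <;>
    · simp only [scoreTrend, List.map_cons, List.map_nil, List.sum_cons, List.sum_nil, pvFB,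
        pvExcl, pvHit, Bool.not_true, Bool.not_false, Bool.false_and, Bool.true_and,
        String.reduceBEq, Bool.or_self, Bool.or_false, Bool.false_or, if_true, pv_term]
      ring_nf
      simp
      ring

-- the table-driven sum over scoreRange equals B's base closed form
theorem pv_range_sum (sigs : List (String × Bool)) (uc : Bool) :
    (scoreRange.map (pvFB sigs uc)).sum
      = pvHit sigs "pivot_sr" * 1 + pvHit sigs "pin_bar" * 2 + pvHit sigs "engulfing" * 2
        + pvHit sigs "ma8_cross" * 1 + pvHit sigs "rsi_extreme" * 1
        + pvHit sigs "three_same_candle" * 1 := by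
  cases uc <;>
    · simp only [scoreRange, List.map_cons, List.map_nil, List.sum_cons, List.sum_nil, pvFB,
        pvExcl, pvHit, Bool.not_true, Bool.not_false, Bool.false_and, Bool.true_and,
        String.reduceBEq, Bool.or_self, if_true, pv_term]
      ring_nf
      simp
      ring

-- ===== VERDICT (by name: the statement is the Claim_ definition above) =====
theorem calc_entry_score_spec : Claim_equal_calc_entry_score := by
  intro mode signals direction use_cross _ hpre
  unfold Spec_calc_entry_score calc_entry_score calc_entry_score_alt
  have hsig : (if signals.isEmpty then ([] : List (String × Bool)) else signals) = signals := by
    cases signals <;> rfl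
  rw [hsig]
  by_cases hm : (mode == "trend_long" || mode == "trend_short") = true
  · rw [if_pos hm]
    simp only [hm, if_true]
    rw [pv_foldl_sum _ (pvFA scoreTrend use_cross)
          (by intro t x; simp only [pvFA, pvExcl]; split_ifs <;> simp)]
    rw [zero_add, pv_main scoreTrend use_cross signals hpre (by decide),
        pv_trend_sum signals use_cross]
    cases use_cross <;> simp [pvHit] <;> ring
  · rw [if_neg hm]
    simp only [hm, if_false]
    rw [pv_foldl_sum _ (pvFA scoreRange use_cross)
          (by intro t x; simp only [pvFA, pvExcl]; split_ifs <;> simp)]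
    rw [zero_add, pv_main scoreRange use_cross signals hpre (by decide),
        pv_range_sum signals use_cross]
    simp [pvHit]
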